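-- pv_equiv track=rewrite | github.com/Terlen/Jinglyshines | utils/aggregateAnalysis.py | getMembersBestRatio
-- ===== SOURCE A (Python) =====
-- def getMembersBestRatio(ratios):
--     items = ratios.items()
--     stats = ratios.values()
--     ratioValues = [item[2] for item in ratios.values()]
--     try:
--         maxRatio = max(ratioValues)
--         best = [(key,value[0],value[1],value[2]) for key, value in items if value[2] == maxRatio]
--         return best
--     except ValueError:
--         return None
-- ===== SOURCE B (Python) =====
-- def getMembersBestRatio(ratios):
--     maxRatio = None
--     best = None
--     for key, value in ratios.items():
--         if best is None or value[2] > maxRatio: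
--             maxRatio = value[2]
--             best = [(key, value[0], value[1], value[2])]
--         elif value[2] == maxRatio:
--             best.append((key, value[0], value[1], value[2]))
--     return best
-- ===== Notes on version B (the rewrite author's own statement) =====
-- stated objective: alternative
-- what changed: Replaces the three full passes (values list, max(), filter comprehension) and exception handling by one single pass keeping a running maximum that resets the result list on strictly-greater and appends on equal.
import Mathlib
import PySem

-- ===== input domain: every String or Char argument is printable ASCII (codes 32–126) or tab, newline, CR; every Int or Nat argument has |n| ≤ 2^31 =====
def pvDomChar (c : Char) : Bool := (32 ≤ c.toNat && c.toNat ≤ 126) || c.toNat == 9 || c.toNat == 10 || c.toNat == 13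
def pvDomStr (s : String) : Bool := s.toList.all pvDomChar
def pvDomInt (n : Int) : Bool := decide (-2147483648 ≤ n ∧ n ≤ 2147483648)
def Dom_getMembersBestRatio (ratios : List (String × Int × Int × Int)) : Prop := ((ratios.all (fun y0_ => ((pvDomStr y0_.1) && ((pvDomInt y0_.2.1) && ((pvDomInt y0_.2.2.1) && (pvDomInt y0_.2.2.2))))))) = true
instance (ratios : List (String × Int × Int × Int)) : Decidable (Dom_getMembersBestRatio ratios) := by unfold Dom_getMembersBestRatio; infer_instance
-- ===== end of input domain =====

-- B replaces A's three passes (values list, max(), filter comprehension) by one single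
-- running-max pass that resets the result list on strictly-greater and appends on equal.

-- ===== PORT A =====
-- literal transliteration of A: build ratioValues, take max (ValueError on empty → none),
-- then the filtering comprehension.
def getMembersBestRatio (ratios : List (String × Int × Int × Int)) : Option (List (String × Int × Int × Int)) :=
  let ratioValues := ratios.map (fun item => item.2.2.2)
  match PySem.List.max? ratioValues (fun x => x) with
  | none => none          -- except ValueError: return None
  | some maxRatio =>
      some ((ratios.filter (fun kv => kv.2.2.2 == maxRatio)).map
        (fun kv => (kv.1, kv.2.1, kv.2.2.1, kv.2.2.2)))

-- ===== PORT B =====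
-- loop body of Source B: reset on first item / strictly greater, append on equal
def pvStepB (st : Option (Int × List (String × Int × Int × Int))) (kv : String × Int × Int × Int) :
    Option (Int × List (String × Int × Int × Int)) :=
  match st with
  | none => some (kv.2.2.2, [(kv.1, kv.2.1, kv.2.2.1, kv.2.2.2)])
  | some (m, best) =>
      if kv.2.2.2 > m then some (kv.2.2.2, [(kv.1, kv.2.1, kv.2.2.1, kv.2.2.2)])
      else if kv.2.2.2 == m then some (m, best ++ [(kv.1, kv.2.1, kv.2.2.1, kv.2.2.2)])
      else some (m, best)

def getMembersBestRatio_alt (ratios : List (String × Int × Int × Int)) : Option (List (String × Int × Int × Int)) :=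
  (ratios.foldl pvStepB none).map (fun st => st.2)

-- ===== PRECONDITION & SPEC =====
def Spec_getMembersBestRatio (ratios : List (String × Int × Int × Int)) (out : Option (List (String × Int × Int × Int))) : Prop := out = getMembersBestRatio_alt ratios
instance (ratios : List (String × Int × Int × Int)) (out : Option (List (String × Int × Int × Int))) : Decidable (Spec_getMembersBestRatio ratios out) := by unfold Spec_getMembersBestRatio; infer_instance

-- ===== CLAIM (what is proved, stated in full; the proofs are below) =====
def Claim_equal_getMembersBestRatio : Prop := ∀ (ratios : List (String × Int × Int × Int)), Dom_getMembersBestRatio ratios → Spec_getMembersBestRatio ratios (getMembersBestRatio ratios)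

-- ===== LEMMAS AND PROOFS =====

-- running maximum of the third components, seeded with m
def pvBmax (m : Int) (l : List (String × Int × Int × Int)) : Int :=
  l.foldl (fun x kv => max x kv.2.2.2) m

-- A's comprehension, for a fixed maximum M
def pvBest (M : Int) (l : List (String × Int × Int × Int)) : List (String × Int × Int × Int) :=
  (l.filter (fun kv => kv.2.2.2 == M)).map (fun kv => (kv.1, kv.2.1, kv.2.2.1, kv.2.2.2))

theorem le_pvBmax (m : Int) (l : List (String × Int × Int × Int)) : m ≤ pvBmax m l := by
  induction l generalizing m with
  | nil => simp [pvBmax]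
  | cons kv t ih =>
      calc m ≤ max m kv.2.2.2 := le_max_left _ _
        _ ≤ pvBmax (max m kv.2.2.2) t := ih _
        _ = pvBmax m (kv :: t) := rfl

-- loop invariant for B's fold: from state (m, acc) it computes the running max and
-- A's filtered list, keeping acc only when the max never strictly increases
theorem pvBest_cons (M : Int) (kv : String × Int × Int × Int) (t : List (String × Int × Int × Int)) :
    pvBest M (kv :: t) =
      (if (kv.2.2.2 == M) = true then [(kv.1, kv.2.1, kv.2.2.1, kv.2.2.2)] else []) ++ pvBest M t := by
  simp only [pvBest, List.filter_cons]
  split_ifs <;> simp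

-- loop invariant for B's fold: from state (m, acc) it computes the running max and
-- A's filtered list, keeping acc only when the max never strictly increases
theorem pvFold_inv (l : List (String × Int × Int × Int)) (m : Int) (acc : List (String × Int × Int × Int)) :
    l.foldl pvStepB (some (m, acc)) =
      some (pvBmax m l, (if pvBmax m l = m then acc else []) ++ pvBest (pvBmax m l) l) := by
  induction l generalizing m acc with
  | nil => simp [pvBmax, pvBest]
  | cons kv t ih =>
      have hexp : pvBmax m (kv :: t) = pvBmax (max m kv.2.2.2) t := rfl
      rcases lt_trichotomy m kv.2.2.2 with hlt | heq | hgt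
      · -- strictly greater: reset
        have hstep : pvStepB (some (m, acc)) kv = some (kv.2.2.2, [(kv.1, kv.2.1, kv.2.2.1, kv.2.2.2)]) := by
          simp [pvStepB, hlt]
        have hB : pvBmax m (kv :: t) = pvBmax kv.2.2.2 t := by
          rw [hexp, max_eq_right hlt.le]
        have hBge : kv.2.2.2 ≤ pvBmax kv.2.2.2 t := le_pvBmax _ _
        have hBne : ¬ pvBmax kv.2.2.2 t = m := by omega
        rw [List.foldl_cons, hstep, ih, hB, pvBest_cons, if_neg hBne, List.nil_append]
        by_cases hc : pvBmax kv.2.2.2 t = kv.2.2.2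
        · have he : (kv.2.2.2 == pvBmax kv.2.2.2 t) = true := by simp [hc]
          rw [if_pos hc, if_pos he]
        · have he : ¬ (kv.2.2.2 == pvBmax kv.2.2.2 t) = true := by simp; omega
          rw [if_neg hc, if_neg he, List.nil_append]
      · -- equal: append
        have h1 : ¬ kv.2.2.2 > m := by omega
        have h2 : (kv.2.2.2 == m) = true := by simp [heq]
        have hstep : pvStepB (some (m, acc)) kv = some (m, acc ++ [(kv.1, kv.2.1, kv.2.2.1, kv.2.2.2)]) := by
          simp only [pvStepB]; rw [if_neg h1, if_pos h2]
        have hB : pvBmax m (kv :: t) = pvBmax m t := by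
          rw [hexp, max_eq_left heq.ge]
        rw [List.foldl_cons, hstep, ih, hB, pvBest_cons]
        by_cases hc : pvBmax m t = m
        · have he : (kv.2.2.2 == pvBmax m t) = true := by simp only [beq_iff_eq, hc]; omega
          rw [if_pos hc, if_pos hc, if_pos he]
          simp [List.append_assoc]
        · have hge : m ≤ pvBmax m t := le_pvBmax _ _
          have he : ¬ (kv.2.2.2 == pvBmax m t) = true := by simp; omega
          rw [if_neg hc, if_neg hc, if_neg he, List.nil_append, List.nil_append]
      · -- smaller: keep state
        have h1 : ¬ kv.2.2.2 > m := by omega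
        have h2 : (kv.2.2.2 == m) = false := by simp; omega
        have hstep : pvStepB (some (m, acc)) kv = some (m, acc) := by
          simp only [pvStepB]; rw [if_neg h1, if_neg (by simp; omega : ¬ (kv.2.2.2 == m) = true)]
        have hB : pvBmax m (kv :: t) = pvBmax m t := by
          rw [hexp, max_eq_left hgt.le]
        have hge : m ≤ pvBmax m t := le_pvBmax _ _
        have he : ¬ (kv.2.2.2 == pvBmax m t) = true := by simp; omega
        rw [List.foldl_cons, hstep, ih, hB, pvBest_cons, if_neg he, List.nil_append]

-- ===== VERDICT (by name: the statement is the Claim_ definition above) =====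
theorem getMembersBestRatio_spec : Claim_equal_getMembersBestRatio := by
  intro ratios _
  unfold Spec_getMembersBestRatio getMembersBestRatio getMembersBestRatio_alt
  cases ratios with
  | nil => simp [PySem.List.max?]
  | cons h t =>
      have hmax : PySem.List.max? ((h :: t).map (fun item => item.2.2.2)) (fun x => x)
          = some ((t.map (fun item => item.2.2.2)).foldl max h.2.2.2) := by
        rw [List.map_cons, PySem.List.max?_id_cons]
      have hbm : (t.map (fun item => item.2.2.2)).foldl max h.2.2.2 = pvBmax h.2.2.2 t := by
        simp [pvBmax, List.foldl_map]
      have hstep : pvStepB none h = some (h.2.2.2, [(h.1, h.2.1, h.2.2.1, h.2.2.2)]) := rfl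
      rw [List.foldl_cons, hstep, pvFold_inv]
      simp only [hmax, hbm, Option.map_some]
      have hge : h.2.2.2 ≤ pvBmax h.2.2.2 t := le_pvBmax _ _
      change some (pvBest (pvBmax h.2.2.2 t) (h :: t)) = _
      rw [pvBest_cons]
      by_cases hc : pvBmax h.2.2.2 t = h.2.2.2
      · have he : (h.2.2.2 == pvBmax h.2.2.2 t) = true := by simp [hc]
        rw [if_pos hc, if_pos he]
      · have he : ¬ (h.2.2.2 == pvBmax h.2.2.2 t) = true := by simp; omega
        rw [if_neg hc, if_neg he, List.nil_append]
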